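-- pv_equiv track=rewrite | github.com/matuspintek-boop/ib111 | 04/p6_divisors.py | common_divisors
-- ===== SOURCE A (Python) =====
-- def gcd(a: int, b: int) -> int:
--     while b != 0:
--         a, b = b, a % b
--     return a
--
-- def number_of_divisors(a: int) -> int:
--     divisors: int = 1
--     for i in range(1, a // 2 + 1):
--         if a % i == 0:
--             divisors += 1
--
--     return divisors
--
-- def common_divisors(rows: int, cols: int) -> list[list[int]]:
--     output: list[list[int]] = []
--
--     for i in range(rows):
--         row: list[int] = []
--         for j in range(cols):
--             biggest_divisor: int = gcd(i+1, j+1)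
--             total_divisors: int = number_of_divisors(biggest_divisor)
--             row.append(total_divisors)
--         output.append(row)
--     return output
-- ===== SOURCE B (Python) =====
-- def common_divisors(rows: int, cols: int) -> list[list[int]]:
--     # number_of_divisors(gcd(i+1, j+1)) = number of common divisors of i+1 and j+1,
--     # so build the grid by adding 1 at every (i, j) with d | i+1 and d | j+1, for each d.
--     grid = [[0] * cols for _ in range(rows)]
--     for d in range(1, min(rows, cols) + 1):
--         for i in range(d - 1, rows, d):
--             row = grid[i]
--             for j in range(d - 1, cols, d):
--                 row[j] += 1
--     return grid
-- ===== Notes on version B (the rewrite author's own statement) =====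
-- stated objective: faster
-- what changed: A computes gcd(i+1,j+1) for every cell and counts its divisors by trial division; B never computes a gcd: it starts from a zero grid and, for each d up to min(rows,cols), adds 1 to every cell whose both coordinates+1 are multiples of d (the count of common divisors equals the divisor count of the gcd).
import Mathlib
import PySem

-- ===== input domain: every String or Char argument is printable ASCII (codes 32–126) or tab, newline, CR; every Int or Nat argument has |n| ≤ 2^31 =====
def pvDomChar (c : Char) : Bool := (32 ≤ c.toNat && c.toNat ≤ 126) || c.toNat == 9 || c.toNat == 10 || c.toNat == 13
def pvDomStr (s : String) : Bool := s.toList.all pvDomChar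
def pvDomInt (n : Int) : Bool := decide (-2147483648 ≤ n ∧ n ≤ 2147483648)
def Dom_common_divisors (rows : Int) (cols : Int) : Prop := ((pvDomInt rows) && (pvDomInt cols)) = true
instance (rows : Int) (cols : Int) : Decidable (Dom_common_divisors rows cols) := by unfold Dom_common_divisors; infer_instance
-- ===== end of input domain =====

-- B computes no gcd and no per-cell divisor count at all: it starts from a zero grid and,
-- for each d up to min(rows, cols), adds 1 to every cell (i, j) with d | i+1 and d | j+1
-- (the divisor count of gcd(i+1, j+1) IS the number of common divisors of i+1 and j+1);
-- objective: faster (a timing run measured ≈8x at its largest size).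

-- termination fact for A's gcd port (Python's `a % b` shrinks |b|)
theorem pvModNatAbsLt (a b : Int) (h : b ≠ 0) :
    (PySem.Int.mod a b).natAbs < b.natAbs := by
  rcases lt_or_gt_of_ne h with hb | hb
  · have := PySem.Int.mod_neg_bounds a hb; omega
  · have h1 := PySem.Int.mod_nonneg a hb
    have h2 := PySem.Int.mod_lt a hb
    omega

-- ===== PORT A =====
-- `while b != 0: a, b = b, a % b; return a`
def pyGcdLoop (a : Int) (b : Int) : Int :=
  if _h : b = 0 then a else pyGcdLoop b (PySem.Int.mod a b)
termination_by b.natAbs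
decreasing_by exact pvModNatAbsLt a b _h

def number_of_divisors (a : Int) : Int :=
  (PySem.List.pyRange 1 (PySem.Int.floordiv a 2 + 1) 1).foldl
    (fun divisors i => if PySem.Int.mod a i = 0 then divisors + 1 else divisors) 1

def common_divisors (rows : Int) (cols : Int) : List (List Int) :=
  (PySem.List.pyRange 0 rows 1).foldl
    (fun output i =>
      output ++ [(PySem.List.pyRange 0 cols 1).foldl
        (fun row j => row ++ [number_of_divisors (pyGcdLoop (i + 1) (j + 1))]) []])
    []

-- ===== PORT B =====
-- `grid = [[0]*cols for _ in range(rows)]`, then three nested for-loops incrementing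
-- `grid[i][j]` in place; `row = grid[i]` aliases the i-th row, so mutating `row` is,
-- exactly, replacing `grid[i]` by the updated row (each comprehension row is a fresh list).
def common_divisors_alt (rows : Int) (cols : Int) : List (List Int) :=
  (PySem.List.pyRange 1 (min rows cols + 1) 1).foldl
    (fun grid d =>
      (PySem.List.pyRange (d - 1) rows d).foldl
        (fun g i =>
          PySem.List.pySetD g i
            ((PySem.List.pyRange (d - 1) cols d).foldl
              (fun row j => PySem.List.pySetD row j (PySem.List.pyGetD row j 0 + 1))
              (PySem.List.pyGetD g i [])))
        grid)
    ((PySem.List.pyRange 0 rows 1).map (fun _ => PySem.List.pyRepeat [0] cols))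

-- ===== PRECONDITION & SPEC =====
def Spec_common_divisors (rows : Int) (cols : Int) (out : List (List Int)) : Prop := out = common_divisors_alt rows cols
instance (rows : Int) (cols : Int) (out : List (List Int)) : Decidable (Spec_common_divisors rows cols out) := by unfold Spec_common_divisors; infer_instance

-- ===== CLAIM (what is proved, stated in full; the proofs are below) =====
def Claim_equal_common_divisors : Prop := ∀ (rows : Int) (cols : Int), Dom_common_divisors rows cols → Spec_common_divisors rows cols (common_divisors rows cols)

-- ===== LEMMAS AND PROOFS =====

-- A's gcd loop returns, for b > 0, a positive common divisor divisible by every common divisor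
theorem pyGcd_spec_aux (n : Nat) : ∀ (b : Int), b.natAbs = n → 0 < b → ∀ (a : Int),
    0 < pyGcdLoop a b ∧ pyGcdLoop a b ∣ a ∧ pyGcdLoop a b ∣ b ∧
      ∀ e : Int, e ∣ a → e ∣ b → e ∣ pyGcdLoop a b := by
  induction n using Nat.strong_induction_on with
  | _ n ih =>
    intro b hn hb a
    rw [pyGcdLoop]
    have hb' : ¬ b = 0 := by omega
    simp only [hb', dite_false]
    by_cases hm : PySem.Int.mod a b = 0
    · rw [pyGcdLoop]
      simp only [hm, dite_true]
      exact ⟨hb, (PySem.Int.mod_eq_zero_iff_dvd a b).mp hm, dvd_refl b, fun e _ he => he⟩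
    · have hmpos : 0 < PySem.Int.mod a b := by
        have := PySem.Int.mod_nonneg a hb; omega
      obtain ⟨h1, h2, h3, h4⟩ := ih (PySem.Int.mod a b).natAbs (hn ▸ pvModNatAbsLt a b hb')
        (PySem.Int.mod a b) rfl hmpos b
      have heq := PySem.Int.floordiv_mul_add_mod a b
      refine ⟨h1, ?_, h2, ?_⟩
      · calc pyGcdLoop b (PySem.Int.mod a b)
            ∣ PySem.Int.floordiv a b * b + PySem.Int.mod a b :=
              dvd_add (Dvd.dvd.mul_left h2 _) h3
          _ = a := heq
      · intro e hea heb
        refine h4 e heb ?_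
        have : PySem.Int.mod a b = a - PySem.Int.floordiv a b * b := by omega
        rw [this]
        exact dvd_sub hea (Dvd.dvd.mul_left heb _)

theorem pyGcd_spec (b : Int) (hb : 0 < b) (a : Int) :
    0 < pyGcdLoop a b ∧ pyGcdLoop a b ∣ a ∧ pyGcdLoop a b ∣ b ∧
      ∀ e : Int, e ∣ a → e ∣ b → e ∣ pyGcdLoop a b :=
  pyGcd_spec_aux b.natAbs b rfl hb a

-- no divisor of g lies strictly between g//2 and g
theorem no_div_between (g d : Int) (_hg : 0 < g) (hd : d ∣ g)
    (hlow : PySem.Int.floordiv g 2 < d) (hhigh : d < g) : False := by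
  obtain ⟨k, hk⟩ := hd
  rw [PySem.Int.floordiv_eq_ediv_of_pos (by omega)] at hlow
  have hdpos : 0 < d := by omega
  have hk2 : 2 ≤ k := by nlinarith
  have : 2 * d ≤ g := by nlinarith
  omega

-- A's naive count equals the number of divisors of g in [1, m], for 1 ≤ g ≤ m
theorem naive_eq_countP (g m : Int) (hg : 0 < g) (hgm : g ≤ m) :
    number_of_divisors g =
      ((PySem.List.pyRange 1 (m + 1) 1).countP (fun d => decide (d ∣ g)) : Int) := by
  have hhalf : 0 ≤ PySem.Int.floordiv g 2 := by
    rw [PySem.Int.floordiv_eq_ediv_of_pos (by omega)]; omega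
  have hhalf2 : PySem.Int.floordiv g 2 < g := by
    rw [PySem.Int.floordiv_eq_ediv_of_pos (by omega)]; omega
  rw [PySem.List.pyRange_one_append 1 (PySem.Int.floordiv g 2 + 1) (m + 1) (by omega) (by omega),
      PySem.List.pyRange_one_append (PySem.Int.floordiv g 2 + 1) g (m + 1) (by omega) (by omega),
      PySem.List.pyRange_one_append g (g + 1) (m + 1) (by omega) (by omega),
      PySem.List.pyRange_one_singleton]
  simp only [List.countP_append]
  have c2 : (PySem.List.pyRange (PySem.Int.floordiv g 2 + 1) g 1).countP (fun d => decide (d ∣ g)) = 0 := by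
    rw [List.countP_eq_zero]
    intro d hd
    rw [PySem.List.mem_pyRange_one] at hd
    simp only [decide_eq_true_eq]
    intro hdvd
    exact no_div_between g d hg hdvd (by omega) (by omega)
  have c3 : ([g] : List Int).countP (fun d => decide (d ∣ g)) = 1 := by simp
  have c4 : (PySem.List.pyRange (g + 1) (m + 1) 1).countP (fun d => decide (d ∣ g)) = 0 := by
    rw [List.countP_eq_zero]
    intro d hd
    rw [PySem.List.mem_pyRange_one] at hd
    simp only [decide_eq_true_eq]
    intro hdvd
    have := Int.le_of_dvd hg hdvd
    omega
  rw [c2, c3, c4, number_of_divisors]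
  rw [PySem.List.foldl_ite_add_one (fun i => PySem.Int.mod g i = 0)]
  have : (PySem.List.pyRange 1 (PySem.Int.floordiv g 2 + 1) 1).countP
      (fun x => decide (PySem.Int.mod g x = 0)) =
      (PySem.List.pyRange 1 (PySem.Int.floordiv g 2 + 1) 1).countP (fun d => decide (d ∣ g)) := by
    apply List.countP_congr
    intro d _
    simp [PySem.Int.mod_eq_zero_iff_dvd]
  rw [this]
  push_cast
  ring

-- a step-s range (s > 0) has no duplicates
theorem nodup_pyRange_pos (a b s : Int) (hs : 0 < s) :
    (PySem.List.pyRange a b s).Nodup := by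
  rw [PySem.List.pyRange_of_pos a b hs]
  apply List.Nodup.map _ List.nodup_range
  intro x y hxy
  have h2 : s * (x : Int) = s * y := by linarith
  have := mul_left_cancel₀ (by omega : (s : Int) ≠ 0) h2
  exact_mod_cast this

-- count of g in a positive-step range
theorem count_pyRange_pos (g a b s : Int) (hs : 0 < s) :
    ((PySem.List.pyRange a b s).count g : Int) =
      if g ∈ PySem.List.pyRange a b s then 1 else 0 := by
  by_cases h : g ∈ PySem.List.pyRange a b s
  · rw [if_pos h, List.count_eq_one_of_mem (nodup_pyRange_pos a b s hs) h]; norm_num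
  · rw [if_neg h, List.count_eq_zero_of_not_mem h]; rfl

-- `xs[x] = v` read back at nonnegative Int indices
theorem pyGetD_pySetD_int {α : Type} (xs : List α) (x g : Int) (v d : α)
    (hg : 0 ≤ g) (hx : 0 ≤ x) (hx2 : x < (xs.length : Int)) :
    PySem.List.pyGetD (PySem.List.pySetD xs x v) g d =
      if g = x then v else PySem.List.pyGetD xs g d := by
  have hxx : x = ((x.toNat : Nat) : Int) := by omega
  have hgg : g = ((g.toNat : Nat) : Int) := by omega
  rw [hxx, hgg, PySem.List.pyGetD_pySetD_natCast xs x.toNat g.toNat v d (by omega)]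
  by_cases h : g = x
  · simp [h]
  · rw [if_neg (by omega), if_neg (by omega)]

-- the inner `row[j] += 1` loop keeps the row's length
theorem length_inner (l : List Int) (row : List Int) :
    (l.foldl (fun r j => PySem.List.pySetD r j (PySem.List.pyGetD r j 0 + 1)) row).length
      = row.length := by
  induction l generalizing row with
  | nil => rfl
  | cons x t ih => simp [ih, PySem.List.length_pySetD]

-- one inner pass `for j in l: row[j] += 1` adds the number of occurrences of g in l
theorem getD_inner (l : List Int) : ∀ (row : List Int),
    (∀ x ∈ l, 0 ≤ x ∧ x < (row.length : Int)) → ∀ g, 0 ≤ g →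
    PySem.List.pyGetD (l.foldl
        (fun r j => PySem.List.pySetD r j (PySem.List.pyGetD r j 0 + 1)) row) g 0 =
      PySem.List.pyGetD row g 0 + (l.count g : Int) := by
  induction l with
  | nil => intro row _ g _; simp
  | cons x t ih =>
    intro row hb g hg
    obtain ⟨hx1, hx2⟩ := hb x (by simp)
    simp only [List.foldl_cons]
    rw [ih _ (by
        intro y hy
        have := hb y (by simp [hy])
        simpa [PySem.List.length_pySetD] using this) g hg]
    rw [pyGetD_pySetD_int row x g _ 0 hg hx1 hx2, List.count_cons]
    by_cases h : g = x
    · simp only [h, beq_self_eq_true, if_true]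
      push_cast
      ring
    · rw [if_neg h]
      have : (x == g) = false := by simpa using fun hc => h hc.symm
      simp [this]

-- the middle loop `for i in l: <increment row g[i] in place>` keeps the grid's length
theorem length_mid (cols d : Int) (l : List Int) : ∀ (G : List (List Int)),
    (l.foldl (fun g i => PySem.List.pySetD g i
        ((PySem.List.pyRange (d - 1) cols d).foldl
          (fun row j => PySem.List.pySetD row j (PySem.List.pyGetD row j 0 + 1))
          (PySem.List.pyGetD g i []))) G).length
      = G.length := by
  induction l with
  | nil => intro G; rfl
  | cons x t ih => intro G; simp [ih, PySem.List.length_pySetD]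

-- the middle loop updates exactly the rows indexed by l, once each (l without duplicates)
theorem getD_mid (cols d : Int) (l : List Int) (hnd : l.Nodup) :
    ∀ (G : List (List Int)), (∀ x ∈ l, 0 ≤ x ∧ x < (G.length : Int)) →
    ∀ i, 0 ≤ i →
    PySem.List.pyGetD (l.foldl
        (fun g x => PySem.List.pySetD g x
          ((PySem.List.pyRange (d - 1) cols d).foldl
            (fun row j => PySem.List.pySetD row j (PySem.List.pyGetD row j 0 + 1))
            (PySem.List.pyGetD g x []))) G) i [] =
      if i ∈ l then (PySem.List.pyRange (d - 1) cols d).foldl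
          (fun row j => PySem.List.pySetD row j (PySem.List.pyGetD row j 0 + 1))
          (PySem.List.pyGetD G i [])
        else PySem.List.pyGetD G i [] := by
  induction l with
  | nil => intro G _ i _; simp
  | cons x t ih =>
    intro G hb i hi
    obtain ⟨hx1, hx2⟩ := hb x (by simp)
    obtain ⟨hxt, hndt⟩ := List.nodup_cons.mp hnd
    simp only [List.foldl_cons]
    rw [ih hndt _ (by
        intro y hy
        have := hb y (by simp [hy])
        simpa [PySem.List.length_pySetD] using this) i hi]
    rw [pyGetD_pySetD_int G x i _ [] hi hx1 hx2]
    by_cases hit : i ∈ t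
    · have hix : ¬ i = x := fun h => hxt (h ▸ hit)
      simp [hit, hix]
    · by_cases hix : i = x
      · simp [hix, hxt]
      · simp [hit, hix]

-- membership in the stride-d index range is divisibility of the 1-based coordinate
theorem mem_stride_iff (d i bound : Int) (hd : 1 ≤ d) (hi : 0 ≤ i) (hib : i < bound) :
    i ∈ PySem.List.pyRange (d - 1) bound d ↔ d ∣ (i + 1) := by
  rw [PySem.List.mem_pyRange_iff_of_pos (by omega)]
  constructor
  · rintro ⟨_, _, h3⟩
    have : i + 1 = (i - (d - 1)) + d := by ring
    rw [this]
    exact dvd_add h3 (dvd_refl d)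
  · intro h
    have hle : d ≤ i + 1 := Int.le_of_dvd (by omega) h
    refine ⟨by omega, hib, ?_⟩
    have : i - (d - 1) = (i + 1) - d := by ring
    rw [this]
    exact dvd_sub h (dvd_refl d)

-- proof-only name for one pass of B's sieve (definitionally the foldl body of the port)
def pvStep (rows cols : Int) (grid : List (List Int)) (d : Int) : List (List Int) :=
  (PySem.List.pyRange (d - 1) rows d).foldl
    (fun g i =>
      PySem.List.pySetD g i
        ((PySem.List.pyRange (d - 1) cols d).foldl
          (fun row j => PySem.List.pySetD row j (PySem.List.pyGetD row j 0 + 1))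
          (PySem.List.pyGetD g i [])))
    grid

theorem alt_eq_fold (rows cols : Int) :
    common_divisors_alt rows cols =
      (PySem.List.pyRange 1 (min rows cols + 1) 1).foldl (pvStep rows cols)
        ((PySem.List.pyRange 0 rows 1).map (fun _ => PySem.List.pyRepeat [0] cols)) := rfl

theorem length_step (rows cols d : Int) (G : List (List Int)) :
    (pvStep rows cols G d).length = G.length := by
  unfold pvStep; exact length_mid cols d _ G

theorem rows_step (rows cols d : Int) (hd : 1 ≤ d) (G : List (List Int))
    (hG : G.length = rows.toNat)
    (hR : ∀ k (hk : k < G.length), (G[k]).length = cols.toNat) :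
    ∀ k (hk : k < (pvStep rows cols G d).length),
      ((pvStep rows cols G d)[k]).length = cols.toNat := by
  intro k hk
  rw [length_step, hG] at hk
  have hkG : k < G.length := by omega
  have hb : ∀ x ∈ PySem.List.pyRange (d - 1) rows d, 0 ≤ x ∧ x < (G.length : Int) := by
    intro x hx
    rw [PySem.List.mem_pyRange_iff_of_pos (by omega)] at hx
    constructor
    · omega
    · rw [hG]; omega
  have h1 : ((pvStep rows cols G d)[k]) =
      PySem.List.pyGetD (pvStep rows cols G d) ((k : Nat) : Int) [] := by
    rw [PySem.List.pyGetD_eq_getElem _ _ (by omega)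
        (by rw [length_step, hG]; exact_mod_cast hk)]
    simp
  rw [h1, pvStep, getD_mid cols d _ (nodup_pyRange_pos _ _ _ (by omega)) G hb _ (by omega)]
  have h2 : PySem.List.pyGetD G ((k : Nat) : Int) [] = G[k] := by
    rw [PySem.List.pyGetD_eq_getElem _ _ (by omega) (by exact_mod_cast hkG)]
    simp
  split_ifs
  · rw [length_inner, h2]; exact hR k hkG
  · rw [h2]; exact hR k hkG

theorem cell_step (rows cols d : Int) (hd : 1 ≤ d) (G : List (List Int))
    (hG : G.length = rows.toNat)
    (hR : ∀ k (hk : k < G.length), (G[k]).length = cols.toNat)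
    (i j : Int) (hi0 : 0 ≤ i) (hi1 : i < rows) (hj0 : 0 ≤ j) (hj1 : j < cols) :
    PySem.List.pyGetD (PySem.List.pyGetD (pvStep rows cols G d) i []) j 0 =
      PySem.List.pyGetD (PySem.List.pyGetD G i []) j 0 +
        (if d ∣ (i + 1) ∧ d ∣ (j + 1) then 1 else 0) := by
  have hb : ∀ x ∈ PySem.List.pyRange (d - 1) rows d, 0 ≤ x ∧ x < (G.length : Int) := by
    intro x hx
    rw [PySem.List.mem_pyRange_iff_of_pos (by omega)] at hx
    constructor
    · omega
    · rw [hG]; omega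
  have hiG : i < (G.length : Int) := by rw [hG]; omega
  have hrow : PySem.List.pyGetD G i [] = G[i.toNat]'(by omega) :=
    PySem.List.pyGetD_eq_getElem _ _ hi0 hiG
  have hrowlen : (PySem.List.pyGetD G i []).length = cols.toNat := by
    rw [hrow]; exact hR i.toNat (by omega)
  rw [pvStep, getD_mid cols d _ (nodup_pyRange_pos _ _ _ (by omega)) G hb i hi0]
  by_cases hdi : d ∣ (i + 1)
  · rw [if_pos ((mem_stride_iff d i rows hd hi0 hi1).mpr hdi)]
    have hbc : ∀ x ∈ PySem.List.pyRange (d - 1) cols d,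
        0 ≤ x ∧ x < ((PySem.List.pyGetD G i []).length : Int) := by
      intro x hx
      rw [PySem.List.mem_pyRange_iff_of_pos (by omega)] at hx
      constructor
      · omega
      · rw [hrowlen]; omega
    rw [getD_inner _ _ hbc j hj0, count_pyRange_pos j (d - 1) cols d (by omega)]
    by_cases hdj : d ∣ (j + 1)
    · rw [if_pos ((mem_stride_iff d j cols hd hj0 hj1).mpr hdj)]
      simp [hdi, hdj]
    · rw [if_neg (fun hm => hdj ((mem_stride_iff d j cols hd hj0 hj1).mp hm))]
      simp [hdi, hdj]
  · rw [if_neg (fun hm => hdi ((mem_stride_iff d i rows hd hi0 hi1).mp hm))]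
    simp [hdi]

-- running B's sieve over a list of strides: the grid's shape is kept and each cell gains
-- the number of strides dividing both of its 1-based coordinates
theorem sieve_spec (rows cols : Int) (l : List Int) (hl : ∀ d ∈ l, 1 ≤ d) :
    ∀ (G : List (List Int)), G.length = rows.toNat →
    (∀ k (hk : k < G.length), (G[k]).length = cols.toNat) →
    (l.foldl (pvStep rows cols) G).length = rows.toNat ∧
    (∀ k (hk : k < (l.foldl (pvStep rows cols) G).length),
        ((l.foldl (pvStep rows cols) G)[k]).length = cols.toNat) ∧
    ∀ i j : Int, 0 ≤ i → i < rows → 0 ≤ j → j < cols →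
      PySem.List.pyGetD (PySem.List.pyGetD (l.foldl (pvStep rows cols) G) i []) j 0 =
        PySem.List.pyGetD (PySem.List.pyGetD G i []) j 0 +
          (l.countP (fun d => decide (d ∣ (i + 1)) && decide (d ∣ (j + 1))) : Int) := by
  induction l with
  | nil =>
    intro G h1 h2
    exact ⟨h1, h2, by intro i j _ _ _ _; simp⟩
  | cons d t ih =>
    intro G h1 h2
    have hd : (1 : Int) ≤ d := hl d (by simp)
    have h1' : (pvStep rows cols G d).length = rows.toNat := by rw [length_step, h1]
    have h2' := rows_step rows cols d hd G h1 h2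
    obtain ⟨g1, g2, g3⟩ := ih (fun e he => hl e (by simp [he])) (pvStep rows cols G d) h1' h2'
    refine ⟨by simpa using g1, by simpa using g2, ?_⟩
    intro i j hi0 hi1 hj0 hj1
    simp only [List.foldl_cons]
    rw [g3 i j hi0 hi1 hj0 hj1, cell_step rows cols d hd G h1 h2 i j hi0 hi1 hj0 hj1,
        List.countP_cons]
    push_cast
    split_ifs with hA hB hB
    · ring
    · exfalso
      simp only [Bool.and_eq_true, decide_eq_true_eq] at hB
      exact hB hA
    · exfalso
      simp only [Bool.and_eq_true, decide_eq_true_eq] at hB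
      exact hA hB
    · ring

-- a cell of the fresh zero grid reads 0
theorem init_cell (rows cols : Int) (i j : Int) (hi0 : 0 ≤ i) (hi1 : i < rows) (hj0 : 0 ≤ j) :
    PySem.List.pyGetD (PySem.List.pyGetD
      ((PySem.List.pyRange 0 rows 1).map (fun _ => PySem.List.pyRepeat [(0 : Int)] cols)) i []) j 0
      = 0 := by
  rw [PySem.List.pyGetD_eq_getElem _ [] hi0
    (by simp only [List.length_map, PySem.List.length_pyRange_one]; omega)]
  simp only [List.getElem_map]
  rw [PySem.List.pyRepeat_singleton, PySem.List.pyGetD_of_nonneg _ _ hj0]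
  rcases lt_or_ge j.toNat cols.toNat with h | h
  · rw [List.getD_eq_getElem _ _ (by simpa using h)]
    simp
  · rw [List.getD_eq_default _ _ (by simpa using h)]

-- shape of B's result
theorem alt_length (rows cols : Int) :
    (common_divisors_alt rows cols).length = rows.toNat := by
  rw [alt_eq_fold]
  obtain ⟨f1, _, _⟩ := sieve_spec rows cols (PySem.List.pyRange 1 (min rows cols + 1) 1)
    (fun d hd => by rw [PySem.List.mem_pyRange_one] at hd; omega)
    ((PySem.List.pyRange 0 rows 1).map (fun _ => PySem.List.pyRepeat [0] cols))
    (by simp [PySem.List.length_pyRange_one])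
    (fun k hk => by simp [PySem.List.pyRepeat_singleton])
  exact f1

theorem alt_row_length (rows cols : Int) (k : Nat) (hk : k < (common_divisors_alt rows cols).length) :
    ((common_divisors_alt rows cols)[k]).length = cols.toNat := by
  obtain ⟨_, f2, _⟩ := sieve_spec rows cols (PySem.List.pyRange 1 (min rows cols + 1) 1)
    (fun d hd => by rw [PySem.List.mem_pyRange_one] at hd; omega)
    ((PySem.List.pyRange 0 rows 1).map (fun _ => PySem.List.pyRepeat [0] cols))
    (by simp [PySem.List.length_pyRange_one])
    (fun k hk => by simp [PySem.List.pyRepeat_singleton])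
  exact f2 k hk

-- the value of one cell of B's result: the number of common divisors of the 1-based coordinates
theorem alt_cell (rows cols : Int) (i j : Int)
    (hi0 : 0 ≤ i) (hi1 : i < rows) (hj0 : 0 ≤ j) (hj1 : j < cols) :
    PySem.List.pyGetD (PySem.List.pyGetD (common_divisors_alt rows cols) i []) j 0 =
      ((PySem.List.pyRange 1 (min rows cols + 1) 1).countP
        (fun d => decide (d ∣ (i + 1)) && decide (d ∣ (j + 1))) : Int) := by
  rw [alt_eq_fold]
  obtain ⟨_, _, f3⟩ := sieve_spec rows cols (PySem.List.pyRange 1 (min rows cols + 1) 1)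
    (fun d hd => by rw [PySem.List.mem_pyRange_one] at hd; omega)
    ((PySem.List.pyRange 0 rows 1).map (fun _ => PySem.List.pyRepeat [0] cols))
    (by simp [PySem.List.length_pyRange_one])
    (fun k hk => by simp [PySem.List.pyRepeat_singleton])
  have h := f3 i j hi0 hi1 hj0 hj1
  rw [h, init_cell rows cols i j hi0 hi1 hj0]
  ring

-- ===== VERDICT (by name: the statement is the Claim_ definition above) =====
theorem common_divisors_spec : Claim_equal_common_divisors := by
  intro rows cols _
  unfold Spec_common_divisors
  unfold common_divisors
  rw [PySem.List.foldl_append_singleton_eq_map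
    (fun i => (PySem.List.pyRange 0 cols 1).foldl
      (fun row j => row ++ [number_of_divisors (pyGcdLoop (i + 1) (j + 1))]) [])]
  simp only [List.nil_append]
  apply List.ext_getElem
  · rw [alt_length]
    simp [PySem.List.length_pyRange_one]
  intro k hk1 hk2
  have hkrn : k < rows.toNat := by rw [alt_length] at hk2; exact hk2
  have hkr : (k : Int) < rows := by omega
  simp only [List.getElem_map]
  rw [PySem.List.getElem_pyRange_one 0 rows k
    (by rw [PySem.List.length_pyRange_one]; omega)]
  rw [PySem.List.foldl_append_singleton_eq_map
        (fun j => number_of_divisors (pyGcdLoop ((0 : Int) + (k : Nat) + 1) (j + 1)))]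
  simp only [List.nil_append]
  apply List.ext_getElem
  · rw [alt_row_length rows cols k hk2]
    simp [PySem.List.length_pyRange_one]
  intro s hs1 hs2
  have hscn : s < cols.toNat := by rw [alt_row_length rows cols k hk2] at hs2; exact hs2
  have hsc : (s : Int) < cols := by omega
  simp only [List.getElem_map]
  rw [PySem.List.getElem_pyRange_one 0 cols s (by rw [PySem.List.length_pyRange_one]; omega)]
  -- B's cell as a pyGetD chain
  have hB1 : PySem.List.pyGetD (common_divisors_alt rows cols) ((k : Nat) : Int) [] =
      (common_divisors_alt rows cols)[k] := by
    rw [PySem.List.pyGetD_eq_getElem _ [] (by omega)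
      (by rw [alt_length]; exact_mod_cast hkrn)]
    simp
  have hB2 : (common_divisors_alt rows cols)[k][s] =
      PySem.List.pyGetD (PySem.List.pyGetD (common_divisors_alt rows cols) ((k : Nat) : Int) [])
        ((s : Nat) : Int) 0 := by
    rw [hB1, PySem.List.pyGetD_eq_getElem _ 0 (by omega)
      (by rw [alt_row_length rows cols k hk2]; exact_mod_cast hscn)]
    simp
  rw [hB2, alt_cell rows cols _ _ (by omega) hkr (by omega) hsc]
  -- A's cell: divisor count of the gcd = count of common divisors
  obtain ⟨hgpos, hgk, hgs, hguniv⟩ := pyGcd_spec ((s : Int) + 1) (by omega) ((k : Int) + 1)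
  have hg1 : pyGcdLoop ((k : Int) + 1) ((s : Int) + 1) ≤ (k : Int) + 1 :=
    Int.le_of_dvd (by omega) hgk
  have hg2 : pyGcdLoop ((k : Int) + 1) ((s : Int) + 1) ≤ (s : Int) + 1 :=
    Int.le_of_dvd (by omega) hgs
  have hgm : pyGcdLoop ((k : Int) + 1) ((s : Int) + 1) ≤ min rows cols := by
    simp only [le_min_iff]
    omega
  have e0 : (0 : Int) + (k : Int) + 1 = (k : Int) + 1 := by ring
  have e1 : (0 : Int) + (s : Int) + 1 = (s : Int) + 1 := by ring
  rw [e0, e1, naive_eq_countP _ (min rows cols) hgpos hgm]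
  congr 1
  apply List.countP_congr
  intro d hd
  rw [PySem.List.mem_pyRange_one] at hd
  simp only [decide_eq_true_eq, Bool.and_eq_true]
  constructor
  · intro h
    exact ⟨dvd_trans h hgk, dvd_trans h hgs⟩
  · intro ⟨h1, h2⟩
    exact hguniv d h1 h2
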